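-- pv_equiv track=rewrite | github.com/academic-storage/CoReBM | Baseline/RevFinder.py | LCSuff
-- ===== SOURCE A (Python) =====
-- def path2List(fileString):
--     return fileString.split("/")
--
-- def LCSuff(f1, f2):
--     f1 = path2List(f1)
--     f2 = path2List(f2)
--     common_path = 0
--     r = range(min(len(f1), len(f2)))
--     rr = list(r)[::-1]
--     for i in rr:
--         if f1[i] == f2[i]:
--             common_path += 1
--         else:
--             break
--     return common_path
-- ===== SOURCE B (Python) =====
-- def path2List(fileString):
--     return fileString.split("/")
--
-- def LCSuff(f1, f2):
--     run = 0
--     for a, b in zip(path2List(f1), path2List(f2)):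
--         run = run + 1 if a == b else 0
--     return run
-- ===== Notes on version B (the rewrite author's own statement) =====
-- stated objective: simpler
-- what changed: Replaces A's reversed-index range loop with an early break by a single forward fold over zip(path2List(f1), path2List(f2)) that increments a running counter on a match and resets it to 0 on a mismatch, with no indexing, no reversal and no break.
import Mathlib
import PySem

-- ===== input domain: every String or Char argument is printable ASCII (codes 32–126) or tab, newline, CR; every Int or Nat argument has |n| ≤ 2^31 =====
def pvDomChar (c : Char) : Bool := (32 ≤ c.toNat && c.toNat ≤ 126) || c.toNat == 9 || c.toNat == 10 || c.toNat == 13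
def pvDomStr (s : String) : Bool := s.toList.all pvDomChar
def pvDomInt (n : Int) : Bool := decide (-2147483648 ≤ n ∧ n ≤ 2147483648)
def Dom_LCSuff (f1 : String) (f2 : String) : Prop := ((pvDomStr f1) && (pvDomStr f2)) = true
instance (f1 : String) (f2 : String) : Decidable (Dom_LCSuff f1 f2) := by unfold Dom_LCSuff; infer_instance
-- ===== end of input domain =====

-- B replaces A's reversed-index loop with break by a single forward fold over the zipped
-- segment lists that resets a running counter on mismatch (objective: simpler).

-- ===== PORT A =====
-- fileString.split("/"): split? returns some because the separator "/" is non-empty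
def path2List (fileString : String) : List String := (PySem.Str.split? fileString "/").getD []

-- the for-loop with break: stop (returning acc) on the first mismatch
def LCSuffLoop (l1 l2 : List String) : List Int → Int → Int
  | [], acc => acc
  | i :: rest, acc =>
    -- f1[i] == f2[i]: pyGet? is exact here since every i from range(min(len,len)) is in range
    if PySem.List.pyGet? l1 i = PySem.List.pyGet? l2 i then LCSuffLoop l1 l2 rest (acc + 1)
    else acc

def LCSuff (f1 : String) (f2 : String) : Int :=
  let l1 := path2List f1
  let l2 := path2List f2
  let r := PySem.List.pyRange 0 (min (PySem.List.len l1) (PySem.List.len l2)) 1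
  let rr := (PySem.List.slice? r none none (-1)).getD []   -- list(r)[::-1]; step -1 never raises
  LCSuffLoop l1 l2 rr 0

-- ===== PORT B =====
def LCSuff_alt (f1 : String) (f2 : String) : Int :=
  ((path2List f1).zip (path2List f2)).foldl
    (fun run ab => if ab.1 == ab.2 then run + 1 else 0) 0

-- ===== PRECONDITION & SPEC =====
def Spec_LCSuff (f1 : String) (f2 : String) (out : Int) : Prop := out = LCSuff_alt f1 f2
instance (f1 : String) (f2 : String) (out : Int) : Decidable (Spec_LCSuff f1 f2 out) := by unfold Spec_LCSuff; infer_instance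

-- ===== CLAIM (what is proved, stated in full; the proofs are below) =====
def Claim_equal_LCSuff : Prop := ∀ (f1 : String) (f2 : String), Dom_LCSuff f1 f2 → Spec_LCSuff f1 f2 (LCSuff f1 f2)

-- ===== LEMMAS AND PROOFS =====

-- length of the leading run of `true`s
def prefRun (bs : List Bool) : Int := ((bs.takeWhile id).length : Int)

-- A's loop counts the leading matching run of the index list it is given
theorem LCSuffLoop_eq_prefRun (l1 l2 : List String) (js : List Int) (acc : Int) :
    LCSuffLoop l1 l2 js acc
      = acc + prefRun (js.map (fun i => decide (PySem.List.pyGet? l1 i = PySem.List.pyGet? l2 i))) := by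
  induction js generalizing acc with
  | nil => simp [LCSuffLoop, prefRun]
  | cons j rest ih =>
    by_cases h : PySem.List.pyGet? l1 j = PySem.List.pyGet? l2 j
    · simp [LCSuffLoop, h, ih, prefRun]
      ring
    · simp [LCSuffLoop, h, prefRun]

-- B's fold computes the trailing run of `true`s, which is the leading run of the reverse
theorem foldl_reset_eq_prefRun_reverse (bs : List Bool) :
    bs.foldl (fun run b => if b then run + 1 else 0) 0 = prefRun bs.reverse := by
  induction bs using List.reverseRecOn with
  | nil => simp [prefRun]
  | append_singleton bs b ih =>
    cases b <;> simp [List.foldl_append, ih, prefRun]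

-- the match indicators along the common indices are the zip's componentwise equalities
theorem map_indices_eq (l1 l2 : List String) :
    (PySem.List.pyRange 0 (min (PySem.List.len l1) (PySem.List.len l2)) 1).map
        (fun i => decide (PySem.List.pyGet? l1 i = PySem.List.pyGet? l2 i))
      = (l1.zip l2).map (fun ab => ab.1 == ab.2) := by
  apply List.ext_getElem
  · simp [PySem.List.length_pyRange_one, PySem.List.len]
    omega
  · intro k h1 h2
    have hlen : k < min l1.length l2.length := by
      simpa [PySem.List.length_pyRange_one, PySem.List.len] using h1
    have hk1 : k < l1.length := lt_of_lt_of_le hlen (min_le_left _ _)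
    have hk2 : k < l2.length := lt_of_lt_of_le hlen (min_le_right _ _)
    simp only [List.getElem_map]
    rw [PySem.List.getElem_pyRange_one]
    simp [List.getElem_zip, PySem.List.pyGet?_natCast,
      List.getElem?_eq_getElem hk1, List.getElem?_eq_getElem hk2]
    by_cases h : l1[k] = l2[k] <;> simp [h]

-- ===== VERDICT (by name: the statement is the Claim_ definition above) =====
theorem LCSuff_spec : Claim_equal_LCSuff := by
  intro f1 f2 _
  unfold Spec_LCSuff LCSuff LCSuff_alt
  simp only [PySem.List.slice?_none_none_neg_one, Option.getD_some]
  rw [LCSuffLoop_eq_prefRun, List.map_reverse, map_indices_eq]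
  rw [← foldl_reset_eq_prefRun_reverse, List.foldl_map]
  simp
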